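-- pv_equiv track=rewrite | github.com/weixian-zhang/AlgosAmigos | src/DSA/Codility-Practices/test_3_find_result_of_missing_dice.py | solution
-- ===== SOURCE A (Python) =====
-- def solution(A, F, M):
--
--     existingDiceSum = sum(A)
--
--     divisor = len(A) + F
--
--     arrF = []  # an element for each missing dice
--     for _ in range(F):
--         arrF.append([1, 7])
--
--     # using recursion to generate cartesian product
--     # or use  from itertools import product
--     # for p in list(product([1,2,3,4,5,6], [1,2,3,4,5,6])):
--     def cartesian_product(ranges, result, *args):
--
--         # absecase
--         if not ranges:
--             result.append(args)
--             return
--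
--         start, stop = ranges[0]
--         for x in range(start, stop):
--             cartesian_product(ranges[1:], result, *args + (x, ))
--
--     cartesianProducts = []
--     cartesian_product(arrF, cartesianProducts)
--
--     for prod in cartesianProducts:
--         prodList = list(prod)
--         if (existingDiceSum + sum(prodList)) // divisor == M:
--             return prodList
--
--     return [0]
-- ===== SOURCE B (Python) =====
-- def solution(A, F, M):
--     d = len(A) + F
--     base = sum(A)
--     if F <= 0:
--         # no missing dice: only the empty assignment exists
--         return [] if base // d == M else [0]
--     lo = M * d - base          # minimal missing-dice sum giving floor mean M
--     hi = lo + d - 1            # maximal such sum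
--     t = max(lo, F)             # smallest achievable valid total
--     if t > min(hi, 6 * F):
--         return [0]
--     res = []
--     for k in range(F - 1, -1, -1):   # k dice remain after this one
--         x = max(1, t - 6 * k)
--         res.append(x)
--         t -= x
--     return res
-- ===== Notes on version B (the rewrite author's own statement) =====
-- stated objective: faster
-- what changed: Replaces the 6^F cartesian-product enumeration with an O(F) greedy: the floor-mean condition becomes a sum interval and the lexicographically smallest valid F-tuple is built digit by digit; intended as asymptotically faster (a timing run saw A time out on inputs where B answered in milliseconds, but could not confirm a ratio on sizes where both finish, so 'faster' is recorded as unconfirmed).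
import Mathlib
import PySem

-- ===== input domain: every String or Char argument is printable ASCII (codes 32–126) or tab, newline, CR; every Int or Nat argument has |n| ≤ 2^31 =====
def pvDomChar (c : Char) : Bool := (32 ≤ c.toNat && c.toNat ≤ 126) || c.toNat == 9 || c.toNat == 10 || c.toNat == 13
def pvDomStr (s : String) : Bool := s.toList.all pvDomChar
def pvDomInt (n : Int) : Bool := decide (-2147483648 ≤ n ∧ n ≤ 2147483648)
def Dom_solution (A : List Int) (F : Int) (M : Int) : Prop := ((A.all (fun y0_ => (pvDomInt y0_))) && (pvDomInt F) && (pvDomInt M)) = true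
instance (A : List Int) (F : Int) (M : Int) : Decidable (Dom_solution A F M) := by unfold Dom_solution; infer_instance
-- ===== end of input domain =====

-- B replaces A's 6^F cartesian-product search by an O(F) greedy construction of the
-- lexicographically smallest valid tuple (the floor-mean condition becomes a sum interval);
-- intended as asymptotically faster (a timing run saw A time out at n=16 where B answered,
-- but could not confirm a ratio at sizes where both finish).

-- ===== PORT A =====
-- inner helper `cartesian_product(ranges, result, *args)`: appending into the shared
-- `result` list is modelled by returning the list of tuples generated by this call.
def cartesianProduct : List (Int × Int) → List Int → List (List Int)
  | [], args => [args]
  | r :: rest, args =>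
      (PySem.List.pyRange r.1 r.2 1).foldl
        (fun acc x => acc ++ cartesianProduct rest (args ++ [x])) []

def solution (A : List Int) (F : Int) (M : Int) : List Int :=
  let existingDiceSum := A.sum
  let divisor : Int := (A.length : Int) + F
  let arrF := (PySem.List.pyRange 0 F 1).foldl
    (fun acc _ => acc ++ [((1 : Int), (7 : Int))]) []
  let cartesianProducts := cartesianProduct arrF []
  match cartesianProducts.find?
      (fun prod => PySem.Int.floordiv (existingDiceSum + prod.sum) divisor == M) with
  | some prodList => prodList
  | none => [0]

-- ===== PORT B =====
def solution_alt (A : List Int) (F : Int) (M : Int) : List Int :=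
  let d : Int := (A.length : Int) + F
  let base := A.sum
  if F ≤ 0 then
    (if PySem.Int.floordiv base d == M then [] else [0])
  else
    let lo := M * d - base
    let hi := lo + d - 1
    let t := max lo F
    if t > min hi (6 * F) then [0]
    else
      ((PySem.List.pyRange (F - 1) (-1) (-1)).foldl
        (fun (st : List Int × Int) k =>
          let x := max 1 (st.2 - 6 * k)
          (st.1 ++ [x], st.2 - x)) ([], t)).1

-- ===== PRECONDITION & SPEC =====
-- Pre_ excludes exactly the inputs with len(A) + F == 0, where the Python A (and B) raise ZeroDivisionError.
def Pre_solution (A : List Int) (F : Int) (M : Int) : Prop := (A.length : Int) + F ≠ 0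
instance (A : List Int) (F : Int) (M : Int) : Decidable (Pre_solution A F M) := by unfold Pre_solution; infer_instance
def pvWitness_solution : List Int × Int × Int := ([1, 2], 2, 1)

def Spec_solution (A : List Int) (F : Int) (M : Int) (out : List Int) : Prop := out = solution_alt A F M
instance (A : List Int) (F : Int) (M : Int) (out : List Int) : Decidable (Spec_solution A F M out) := by unfold Spec_solution; infer_instance

-- ===== CLAIM (what is proved, stated in full; the proofs are below) =====
def Claim_equal_solution : Prop := ∀ (A : List Int) (F : Int) (M : Int), Dom_solution A F M → Pre_solution A F M → Spec_solution A F M (solution A F M)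

-- ===== LEMMAS AND PROOFS =====

-- all tuples of [1..6]^n in lexicographic order
def cart : Nat → List (List Int)
  | 0 => [[]]
  | n + 1 => ([1, 2, 3, 4, 5, 6] : List Int).flatMap (fun x => (cart n).map (x :: ·))

-- lexicographically smallest n-tuple over [1..6] with sum t (assuming n ≤ t ≤ 6n)
def greedy : Nat → Int → List Int
  | 0, _ => []
  | n + 1, t => max 1 (t - 6 * n) :: greedy n (t - max 1 (t - 6 * n))

theorem foldl_append_const {α β : Type} (l : List α) (c : β) (init : List β) :
    l.foldl (fun acc _ => acc ++ [c]) init = init ++ List.replicate l.length c := by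
  induction l generalizing init with
  | nil => simp
  | cons a l ih =>
    simp only [List.foldl, ih, List.length_cons, List.append_assoc]
    congr 1

theorem arrF_eq (F : Int) :
    (PySem.List.pyRange 0 F 1).foldl (fun acc _ => acc ++ [((1 : Int), (7 : Int))]) []
      = List.replicate F.toNat ((1 : Int), (7 : Int)) := by
  rw [foldl_append_const, List.nil_append, PySem.List.length_pyRange_one]
  norm_num

theorem find?_flatMap {α β : Type} (p : β → Bool) (f : α → List β) (l : List α) :
    (l.flatMap f).find? p = l.findSome? (fun x => (f x).find? p) := by
  induction l with
  | nil => simp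
  | cons a l ih =>
    simp only [List.flatMap_cons, List.find?_append, ih, List.findSome?_cons]
    cases List.find? p (f a) <;> simp

theorem cp_replicate (n : Nat) (args : List Int) :
    cartesianProduct (List.replicate n ((1 : Int), (7 : Int))) args
      = (cart n).map (args ++ ·) := by
  induction n generalizing args with
  | zero => simp [cartesianProduct, cart]
  | succ n ih =>
    rw [List.replicate_succ]
    show (PySem.List.pyRange 1 7 1).foldl
        (fun acc x => acc ++ cartesianProduct (List.replicate n ((1:Int),(7:Int))) (args ++ [x])) []
      = _
    have hr : PySem.List.pyRange 1 7 1 = [1, 2, 3, 4, 5, 6] := by decide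
    rw [hr, PySem.List.foldl_append_eq_flatMap]
    simp only [ih, cart, List.map_flatMap, List.map_map, List.nil_append]
    congr 1
    funext x
    congr 1
    funext t
    simp

-- the greedy loop of B computes `greedy`
theorem loopB_eq (n : Nat) (acc : List Int) (t : Int) :
    ((PySem.List.pyRange ((n : Int) - 1) (-1) (-1)).foldl
      (fun (st : List Int × Int) k =>
        let x := max 1 (st.2 - 6 * k)
        (st.1 ++ [x], st.2 - x)) (acc, t)).1 = acc ++ greedy n t := by
  induction n generalizing acc t with
  | zero =>
    norm_num
    simp [greedy]
  | succ n ih =>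
    rw [PySem.List.pyRange_neg_one_cons (by omega : (-1 : Int) < (n + 1 : Nat) - 1)]
    push_cast
    simp only [List.foldl_cons]
    have : ((n : Int) + 1 - 1) = (n : Int) := by ring
    rw [this]
    have := ih (acc ++ [max 1 (t - 6 * n)]) (t - max 1 (t - 6 * n))
    simp only [greedy]
    simp only [List.append_assoc, List.singleton_append] at this ⊢
    exact this

-- main characterisation: first tuple of cart n whose sum lies in [lo, hi]
theorem find_cart (n : Nat) (lo hi : Int) :
    (cart n).find? (fun t => decide (lo ≤ t.sum ∧ t.sum ≤ hi))
      = if max lo (n : Int) ≤ min hi (6 * n) then some (greedy n (max lo n)) else none := by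
  induction n generalizing lo hi with
  | zero =>
    by_cases h : lo ≤ 0 ∧ 0 ≤ hi
    · rw [if_pos (by push_cast; omega)]
      simp [cart, greedy, h]
    · rw [if_neg (by push_cast; omega)]
      simp [cart, List.find?, h]
  | succ n ih =>
    have hblk : ∀ x : Int, ((cart n).map (x :: ·)).find? (fun t => decide (lo ≤ t.sum ∧ t.sum ≤ hi))
        = if max (lo - x) (n : Int) ≤ min (hi - x) (6 * n)
          then some (x :: greedy n (max (lo - x) n)) else none := by
      intro x
      rw [List.find?_map]
      have hp : (fun t => decide (lo ≤ t.sum ∧ t.sum ≤ hi)) ∘ (x :: ·)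
          = (fun t : List Int => decide (lo - x ≤ t.sum ∧ t.sum ≤ hi - x)) := by
        funext t
        simp only [Function.comp, List.sum_cons, decide_eq_decide]
        omega
      rw [hp, ih]
      split_ifs <;> simp
    show (([1,2,3,4,5,6] : List Int).flatMap (fun x => (cart n).map (x :: ·))).find? _ = _
    rw [find?_flatMap]
    simp only [List.findSome?_cons, List.findSome?_nil, hblk]
    by_cases hfeas : max lo ((n : Int) + 1) ≤ min hi (6 * n + 6)
    · have hx1 : (1 : Int) ≤ max 1 (lo - 6 * n) := by omega
      have hx6 : max 1 (lo - 6 * n) ≤ 6 := by omega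
      have hres : ∀ k : Int, k = max 1 (lo - 6 * n) →
          (some (k :: greedy n (max (lo - k) n)) : Option (List Int))
            = if max lo ((n + 1 : Nat) : Int) ≤ min hi (6 * ((n + 1 : Nat) : Int))
              then some (greedy (n + 1) (max lo ((n + 1 : Nat) : Int))) else none := by
        intro k hk
        rw [if_pos (by push_cast; omega)]
        refine congrArg some ?_
        show _ = greedy (n + 1) (max lo ((n + 1 : Nat) : Int))
        rw [greedy]
        congr 1
        · push_cast; omega
        · exact congrArg (greedy n) (by push_cast; omega)
      interval_cases hk : (max 1 (lo - 6 * n) : Int)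
      · rw [if_pos (by omega)]
        exact hres 1 rfl
      · rw [if_neg (by omega), if_pos (by omega)]
        exact hres 2 rfl
      · rw [if_neg (by omega), if_neg (by omega), if_pos (by omega)]
        exact hres 3 rfl
      · rw [if_neg (by omega), if_neg (by omega), if_neg (by omega), if_pos (by omega)]
        exact hres 4 rfl
      · rw [if_neg (by omega), if_neg (by omega), if_neg (by omega), if_neg (by omega),
          if_pos (by omega)]
        exact hres 5 rfl
      · rw [if_neg (by omega), if_neg (by omega), if_neg (by omega), if_neg (by omega),
          if_neg (by omega), if_pos (by omega)]
        exact hres 6 rfl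
    · rw [if_neg (by omega), if_neg (by omega), if_neg (by omega), if_neg (by omega),
        if_neg (by omega), if_neg (by omega), if_neg (by push_cast; omega)]

theorem solution_eq_alt (A : List Int) (F : Int) (M : Int) :
    (A.length : Int) + F ≠ 0 → solution A F M = solution_alt A F M := by
  intro hd
  by_cases hF : F ≤ 0
  · have h0 : F.toNat = 0 := by omega
    simp only [solution, solution_alt, arrF_eq, h0, List.replicate_zero, cartesianProduct,
      if_pos hF]
    cases hb : (PySem.Int.floordiv (A.sum) ((A.length : Int) + F) == M) <;>
      simp [List.find?, List.sum_nil, add_zero, hb]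
  · have hF' : 0 < F := by omega
    have hd' : 0 < (A.length : Int) + F := by
      have : (0 : Int) ≤ A.length := Int.natCast_nonneg _
      omega
    have hFn : ((F.toNat : Int)) = F := Int.toNat_of_nonneg (by omega)
    have key : (fun prod : List Int =>
          PySem.Int.floordiv (A.sum + prod.sum) ((A.length : Int) + F) == M)
        = (fun t : List Int => decide (M * ((A.length : Int) + F) - A.sum ≤ t.sum ∧
            t.sum ≤ M * ((A.length : Int) + F) - A.sum + ((A.length : Int) + F) - 1)) := by
      funext t
      rw [Bool.eq_iff_iff]
      simp only [beq_iff_eq, decide_eq_true_eq]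
      rw [PySem.Int.floordiv_eq_iff_of_pos hd', add_one_mul]
      omega
    simp only [solution, solution_alt, arrF_eq, cp_replicate, List.nil_append, List.map_id',
      if_neg hF, key, find_cart, hFn]
    by_cases hfeas : max (M * ((A.length : Int) + F) - A.sum) F
        ≤ min (M * ((A.length : Int) + F) - A.sum + ((A.length : Int) + F) - 1) (6 * F)
    · rw [if_pos hfeas, if_neg (by omega)]
      rw [show F - 1 = ((F.toNat : Int)) - 1 by omega]
      rw [loopB_eq F.toNat [] (max (M * ((A.length : Int) + F) - A.sum) F)]
      simp
    · rw [if_neg hfeas, if_pos (by omega)]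

-- ===== VERDICT (by name: the statement is the Claim_ definition above) =====
theorem solution_spec : Claim_equal_solution := by
  intro A F M _ hpre
  exact solution_eq_alt A F M hpre
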